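-- pv_equiv track=rewrite | github.com/sethnr/swga_bwt | swga_bwt_cnt.py | firstColNP
-- ===== SOURCE A (Python) =====
-- allBases = ['a','c','g','t','n','$']
--
-- def firstColNP(tots):
--   # get ranges of each base in first col (contiguous as BWM is sorted)
--   first = {}
--   totc = 0
--   for n in range(0,len(allBases)):
--     c = allBases[n]
--     count = tots[n]
--     first[c] = (totc, totc + count)
--     totc += count
--   return first
-- ===== SOURCE B (Python) =====
-- allBases = ['a','c','g','t','n','$']
--
-- def firstColNP(tots):
--   # each base's range computed independently from scratch: start = sum of all
--   # earlier counts (a fresh slice-sum per base), no running accumulator carried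
--   return {b: (sum(tots[:n]), sum(tots[:n]) + tots[n])
--           for n, b in enumerate(allBases)}
-- ===== Notes on version B (the rewrite author's own statement) =====
-- stated objective: alternative
-- what changed: B drops A's running-total accumulator entirely: it computes each base's range independently with a fresh slice-sum sum(tots[:n]) per base (nested scans) in a single dict comprehension over enumerate(allBases).
import Mathlib
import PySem

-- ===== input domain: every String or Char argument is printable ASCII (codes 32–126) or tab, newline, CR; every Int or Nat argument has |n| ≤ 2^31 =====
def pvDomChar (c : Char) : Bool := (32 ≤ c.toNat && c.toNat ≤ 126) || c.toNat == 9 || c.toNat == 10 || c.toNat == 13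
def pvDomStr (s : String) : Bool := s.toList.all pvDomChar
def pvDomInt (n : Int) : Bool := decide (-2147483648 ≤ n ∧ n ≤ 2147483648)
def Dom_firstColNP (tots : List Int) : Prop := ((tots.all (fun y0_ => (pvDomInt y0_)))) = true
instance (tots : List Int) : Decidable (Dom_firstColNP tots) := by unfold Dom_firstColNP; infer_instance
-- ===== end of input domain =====

-- B computes each base's range independently (a fresh slice-sum per base) instead of A's single pass carrying a running total (alternative decomposition, same result).

-- ===== PORT A =====
def pvAllBases : List String := ["a", "c", "g", "t", "n", "$"]

-- A: for n in range(0, len(allBases)): first[allBases[n]] = (totc, totc + tots[n]); totc += tots[n]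
-- tots[n] never raises under Pre_ (6 ≤ length), so pyGetD is exact there.
def firstColNP (tots : List Int) : List (String × Int × Int) :=
  let st := (PySem.List.pyRange 0 6 1).foldl
    (fun (st : PySem.Dict String (Int × Int) × Int) n =>
      let c := PySem.List.pyGetD pvAllBases n ""
      let count := PySem.List.pyGetD tots n 0
      (st.1.insert c (st.2, st.2 + count), st.2 + count))
    (PySem.Dict.empty, 0)
  st.1.items

-- ===== PORT B =====
-- B: {b: (sum(tots[:n]), sum(tots[:n]) + tots[n]) for n, b in enumerate(allBases)}
def firstColNP_alt (tots : List Int) : List (String × Int × Int) :=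
  (PySem.Dict.ofList ((PySem.List.enumerate pvAllBases).map (fun nb =>
    (nb.2,
     ((PySem.List.slice tots none (some nb.1)).foldl (· + ·) 0,
      (PySem.List.slice tots none (some nb.1)).foldl (· + ·) 0
        + PySem.List.pyGetD tots nb.1 0))))).items

-- ===== PRECONDITION & SPEC =====
-- Pre_ excludes tots with fewer than the 6 bases' counts, on which A raises IndexError at tots[n].
def Pre_firstColNP (tots : List Int) : Prop := 6 ≤ tots.length
instance (tots : List Int) : Decidable (Pre_firstColNP tots) := by unfold Pre_firstColNP; infer_instance
def pvWitness_firstColNP : List Int := [3, 1, 4, 1, 5, 9]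

def Spec_firstColNP (tots : List Int) (out : List (String × Int × Int)) : Prop := out = firstColNP_alt tots
instance (tots : List Int) (out : List (String × Int × Int)) : Decidable (Spec_firstColNP tots out) := by unfold Spec_firstColNP; infer_instance

-- ===== CLAIM (what is proved, stated in full; the proofs are below) =====
def Claim_equal_firstColNP : Prop := ∀ (tots : List Int), Dom_firstColNP tots → Pre_firstColNP tots → Spec_firstColNP tots (firstColNP tots)

-- ===== LEMMAS AND PROOFS =====

-- Both ports evaluate, on a list with ≥ 6 elements, to the same literal table of base ranges.
set_option maxHeartbeats 1000000 in
theorem firstColNP_eval (t0 t1 t2 t3 t4 t5 : Int) (rest : List Int) :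
    firstColNP (t0::t1::t2::t3::t4::t5::rest) =
      [("a",0,t0),("c",t0,t0+t1),("g",t0+t1,t0+t1+t2),("t",t0+t1+t2,t0+t1+t2+t3),
       ("n",t0+t1+t2+t3,t0+t1+t2+t3+t4),("$",t0+t1+t2+t3+t4,t0+t1+t2+t3+t4+t5)] := by
  have hr : PySem.List.pyRange 0 6 1 = [0,1,2,3,4,5] := by decide
  have g0 : PySem.List.pyGetD (t0::t1::t2::t3::t4::t5::rest) (0:Int) 0 = t0 := by simp [pysem]
  have g1 : PySem.List.pyGetD (t0::t1::t2::t3::t4::t5::rest) (1:Int) 0 = t1 := by simp [pysem]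
  have g2 : PySem.List.pyGetD (t0::t1::t2::t3::t4::t5::rest) (2:Int) 0 = t2 := by simp [pysem]
  have g3 : PySem.List.pyGetD (t0::t1::t2::t3::t4::t5::rest) (3:Int) 0 = t3 := by simp [pysem]
  have g4 : PySem.List.pyGetD (t0::t1::t2::t3::t4::t5::rest) (4:Int) 0 = t4 := by simp [pysem]
  have g5 : PySem.List.pyGetD (t0::t1::t2::t3::t4::t5::rest) (5:Int) 0 = t5 := by simp [pysem]
  simp only [firstColNP, hr, List.foldl, g0, g1, g2, g3, g4, g5]
  have b0 : PySem.List.pyGetD pvAllBases (0:Int) "" = "a" := by decide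
  have b1 : PySem.List.pyGetD pvAllBases (1:Int) "" = "c" := by decide
  have b2 : PySem.List.pyGetD pvAllBases (2:Int) "" = "g" := by decide
  have b3 : PySem.List.pyGetD pvAllBases (3:Int) "" = "t" := by decide
  have b4 : PySem.List.pyGetD pvAllBases (4:Int) "" = "n" := by decide
  have b5 : PySem.List.pyGetD pvAllBases (5:Int) "" = "$" := by decide
  simp only [b0, b1, b2, b3, b4, b5]
  simp [PySem.Dict.insert, PySem.Dict.empty, PySem.Dict.contains]

set_option maxHeartbeats 1000000 in
theorem firstColNP_alt_eval (t0 t1 t2 t3 t4 t5 : Int) (rest : List Int) :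
    firstColNP_alt (t0::t1::t2::t3::t4::t5::rest) =
      [("a",0,t0),("c",t0,t0+t1),("g",t0+t1,t0+t1+t2),("t",t0+t1+t2,t0+t1+t2+t3),
       ("n",t0+t1+t2+t3,t0+t1+t2+t3+t4),("$",t0+t1+t2+t3+t4,t0+t1+t2+t3+t4+t5)] := by
  have he : PySem.List.enumerate pvAllBases 0 =
      [(0,"a"),(1,"c"),(2,"g"),(3,"t"),(4,"n"),(5,"$")] := by decide
  have g0 : PySem.List.pyGetD (t0::t1::t2::t3::t4::t5::rest) (0:Int) 0 = t0 := by simp [pysem]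
  have g1 : PySem.List.pyGetD (t0::t1::t2::t3::t4::t5::rest) (1:Int) 0 = t1 := by simp [pysem]
  have g2 : PySem.List.pyGetD (t0::t1::t2::t3::t4::t5::rest) (2:Int) 0 = t2 := by simp [pysem]
  have g3 : PySem.List.pyGetD (t0::t1::t2::t3::t4::t5::rest) (3:Int) 0 = t3 := by simp [pysem]
  have g4 : PySem.List.pyGetD (t0::t1::t2::t3::t4::t5::rest) (4:Int) 0 = t4 := by simp [pysem]
  have g5 : PySem.List.pyGetD (t0::t1::t2::t3::t4::t5::rest) (5:Int) 0 = t5 := by simp [pysem]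
  have s0 : PySem.List.slice (t0::t1::t2::t3::t4::t5::rest) none (some (0:Int)) = [] := by
    simpa using PySem.List.slice_to_natCast (t0::t1::t2::t3::t4::t5::rest) 0
  have s1 : PySem.List.slice (t0::t1::t2::t3::t4::t5::rest) none (some (1:Int)) = [t0] := by
    simpa using PySem.List.slice_to_natCast (t0::t1::t2::t3::t4::t5::rest) 1
  have s2 : PySem.List.slice (t0::t1::t2::t3::t4::t5::rest) none (some (2:Int)) = [t0,t1] := by
    simpa using PySem.List.slice_to_natCast (t0::t1::t2::t3::t4::t5::rest) 2
  have s3 : PySem.List.slice (t0::t1::t2::t3::t4::t5::rest) none (some (3:Int)) = [t0,t1,t2] := by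
    simpa using PySem.List.slice_to_natCast (t0::t1::t2::t3::t4::t5::rest) 3
  have s4 : PySem.List.slice (t0::t1::t2::t3::t4::t5::rest) none (some (4:Int)) = [t0,t1,t2,t3] := by
    simpa using PySem.List.slice_to_natCast (t0::t1::t2::t3::t4::t5::rest) 4
  have s5 : PySem.List.slice (t0::t1::t2::t3::t4::t5::rest) none (some (5:Int)) = [t0,t1,t2,t3,t4] := by
    simpa using PySem.List.slice_to_natCast (t0::t1::t2::t3::t4::t5::rest) 5
  simp only [firstColNP_alt, he, List.map, s0, s1, s2, s3, s4, s5,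
    g0, g1, g2, g3, g4, g5, List.foldl]
  simp [PySem.Dict.ofList, PySem.Dict.update, PySem.Dict.insert, PySem.Dict.empty,
    PySem.Dict.contains]

-- ===== VERDICT (by name: the statement is the Claim_ definition above) =====
theorem firstColNP_spec : Claim_equal_firstColNP := by
  intro tots _ hpre
  unfold Pre_firstColNP at hpre
  unfold Spec_firstColNP
  rcases tots with _ | ⟨t0, _ | ⟨t1, _ | ⟨t2, _ | ⟨t3, _ | ⟨t4, _ | ⟨t5, rest⟩⟩⟩⟩⟩⟩ <;>
    first
    | (exact (firstColNP_eval t0 t1 t2 t3 t4 t5 rest).trans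
        (firstColNP_alt_eval t0 t1 t2 t3 t4 t5 rest).symm)
    | (exfalso; simp at hpre)
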